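-- pv_equiv track=rewrite | github.com/KyongBeom/baekjoon | 프로그래머스/0/120896. 한 번만 등장한 문자/한 번만 등장한 문자.py | solution
-- ===== SOURCE A (Python) =====
-- def solution(s):
--     answer = ''
--     dict = {}
--     for i in s:
--         if i in dict:
--             dict[i] += 1
--         else:
--             dict[i] = 1
--
--     for i in dict:
--         if dict[i] == 1:
--             answer += i
--     answer = sorted(answer)
--     return "".join(answer)
-- ===== SOURCE B (Python) =====
-- def solution(s):
--     # sort the characters, then one pass grouping runs of equal chars;
--     # a run of length 1 contributes its character (output already sorted)
--     cs = sorted(s)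
--     out = []
--     while cs:
--         c = cs[0]
--         rest = cs[1:]
--         run = 0
--         while run < len(rest) and rest[run] == c:
--             run += 1
--         if run == 0:
--             out.append(c)
--         cs = rest[run:]
--     return "".join(out)
-- ===== Notes on version B (the rewrite author's own statement) =====
-- stated objective: alternative
-- what changed: B sorts the characters first and finds length-1 runs in a single grouping scan, maintaining no frequency dictionary and needing no final sort, whereas A builds a count dict, filters it, then sorts the survivors.
import Mathlib
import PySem

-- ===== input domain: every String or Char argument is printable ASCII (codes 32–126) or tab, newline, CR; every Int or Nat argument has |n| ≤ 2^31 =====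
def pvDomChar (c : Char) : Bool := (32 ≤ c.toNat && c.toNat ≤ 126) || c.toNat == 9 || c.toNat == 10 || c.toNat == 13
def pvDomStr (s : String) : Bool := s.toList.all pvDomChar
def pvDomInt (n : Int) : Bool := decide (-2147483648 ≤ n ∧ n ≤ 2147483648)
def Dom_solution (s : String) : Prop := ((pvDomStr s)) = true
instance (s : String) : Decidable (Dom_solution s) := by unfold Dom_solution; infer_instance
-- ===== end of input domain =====

-- B finds length-1 runs in one scan over the sorted characters instead of building a count dict and sorting the survivors; same cost, different algorithm.

-- ===== PORT A =====
def solution (s : String) : String :=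
  -- for i in s: dict[i] = dict[i] + 1 if i in dict else 1
  let d : PySem.Dict Char Int :=
    s.toList.foldl
      (fun d i => if d.contains i then d.insert i (d.getD i 0 + 1) else d.insert i 1)
      PySem.Dict.empty
  -- for i in dict: if dict[i] == 1: answer += i
  let answer : List Char :=
    d.keys.foldl (fun acc i => if d.getD i 0 == 1 then acc ++ [i] else acc) []
  String.ofList (PySem.List.sorted answer (fun x => x) false)

-- ===== PORT B =====
-- Source B's grouping scan: head c, run = leading copies of c in the rest; keep c iff the run is empty
def onceRuns : List Char → List Char
  | [] => []
  | c :: rest =>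
    let run := rest.takeWhile (fun x => x == c)
    let tail := rest.dropWhile (fun x => x == c)
    (if run.isEmpty then [c] else []) ++ onceRuns tail
termination_by l => l.length
decreasing_by
  simp only [List.length_cons]
  exact Nat.lt_succ_of_le (List.length_dropWhile_le _ _)

def solution_alt (s : String) : String :=
  String.ofList (onceRuns (PySem.List.sorted s.toList (fun x => x) false))

-- ===== PRECONDITION & SPEC =====
def Spec_solution (s : String) (out : String) : Prop := out = solution_alt s
instance (s : String) (out : String) : Decidable (Spec_solution s out) := by unfold Spec_solution; infer_instance

-- ===== CLAIM (what is proved, stated in full; the proofs are below) =====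
def Claim_equal_solution : Prop := ∀ (s : String), Dom_solution s → Spec_solution s (solution s)

-- ===== LEMMAS AND PROOFS =====

theorem onceRuns_nil : onceRuns [] = [] := by rw [onceRuns]

theorem onceRuns_cons (c : Char) (rest : List Char) :
    onceRuns (c :: rest) =
      (if (rest.takeWhile (fun x => x == c)).isEmpty then [c] else []) ++
        onceRuns (rest.dropWhile (fun x => x == c)) := by
  rw [onceRuns]

theorem onceRuns_subset (l : List Char) : ∀ c ∈ onceRuns l, c ∈ l := by
  induction l using onceRuns.induct with
  | case1 => simp [onceRuns_nil]
  | case2 c rest run ih =>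
    intro x hx
    rw [onceRuns_cons] at hx
    rcases List.mem_append.1 hx with h | h
    · split at h <;> simp_all
    · exact List.mem_cons_of_mem _ ((rest.dropWhile_sublist (p := fun x => x == c)).mem (ih x h))

theorem not_mem_tail {c : Char} {rest : List Char}
    (hp : (c :: rest).Pairwise (· ≤ ·)) : c ∉ rest.dropWhile (fun x => x == c) := by
  intro hmem
  have hle : ∀ x ∈ rest, c ≤ x := (List.pairwise_cons.1 hp).1
  have hsub := rest.dropWhile_sublist (p := fun x => x == c)
  cases htail : rest.dropWhile (fun x => x == c) with
  | nil => rw [htail] at hmem; exact absurd hmem (List.not_mem_nil)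
  | cons d t' =>
    rw [htail] at hmem hsub
    have hd : (d == c) = false := by
      have := List.head?_dropWhile_not (fun x => x == c) rest
      rw [htail] at this; simpa using this
    have hdc : d ≠ c := by simpa using hd
    rcases List.mem_cons.1 hmem with h | h
    · exact hdc h.symm
    · -- c ∈ t'; pairwise on d :: t' from rest's pairwise
      have hp' : (d :: t').Pairwise (· ≤ ·) := (List.pairwise_cons.1 hp).2.sublist hsub
      have : d ≤ c := (List.pairwise_cons.1 hp').1 c h
      have : c ≤ d := hle d (hsub.mem (List.mem_cons_self))
      exact hdc (le_antisymm ‹d ≤ c› this)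

theorem mem_onceRuns {l : List Char} (hp : l.Pairwise (· ≤ ·)) :
    ∀ c, c ∈ onceRuns l ↔ l.count c = 1 := by
  induction l using onceRuns.induct with
  | case1 => simp [onceRuns_nil]
  | case2 c rest run ih =>
    intro x
    have hsplit := rest.takeWhile_append_dropWhile (p := fun y => y == c)
    have htail : (rest.dropWhile (fun y => y == c)).Pairwise (· ≤ ·) :=
      (List.pairwise_cons.1 hp).2.sublist (rest.dropWhile_sublist (p := fun y => y == c))
    have ihx : x ∈ onceRuns (rest.dropWhile (fun y => y == c)) ↔
        (rest.dropWhile (fun y => y == c)).count x = 1 := ih htail x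
    have hnm : c ∉ rest.dropWhile (fun y => y == c) := not_mem_tail hp
    have hruneq : ∀ y ∈ rest.takeWhile (fun y => y == c), y = c := by
      intro y hy; simpa using List.mem_takeWhile_imp hy
    rw [onceRuns_cons, List.mem_append]
    by_cases hxc : x = c
    · subst hxc
      have h0 : (rest.dropWhile (fun y => y == x)).count x = 0 :=
        List.count_eq_zero.2 hnm
      have hruncount : (rest.takeWhile (fun y => y == x)).count x
          = (rest.takeWhile (fun y => y == x)).length :=
        List.count_eq_length.2 (fun y hy => (hruneq y hy).symm)
      have hrest : rest.count x = (rest.takeWhile (fun y => y == x)).length := by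
        conv_lhs => rw [← hsplit]
        rw [List.count_append, hruncount, h0]
        omega
      have hcnt : (x :: rest).count x = (rest.takeWhile (fun y => y == x)).length + 1 := by
        rw [List.count_cons_self, hrest]
      have hnot : x ∉ onceRuns (rest.dropWhile (fun y => y == x)) := by
        intro h; have h1 := ihx.1 h; rw [h0] at h1; exact absurd h1 (by omega)
      rw [hcnt]
      constructor
      · rintro (h | h)
        · split at h
          · rename_i hemp
            rw [List.isEmpty_iff] at hemp
            simp [hemp]
          · simp at h
        · exact absurd h hnot
      · intro h
        have hlen : (rest.takeWhile (fun y => y == x)).length = 0 := by omega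
        left
        simp [List.length_eq_zero_iff.1 hlen]
    · have hrz : (rest.takeWhile (fun y => y == c)).count x = 0 :=
        List.count_eq_zero.2 (fun h => hxc (hruneq x h))
      have hcnt : (c :: rest).count x = rest.count x := by
        simp [Ne.symm hxc]
      have hrest : rest.count x = (rest.dropWhile (fun y => y == c)).count x := by
        conv_lhs => rw [← hsplit]
        rw [List.count_append, hrz, Nat.zero_add]
      constructor
      · rintro (h | h)
        · split at h <;> simp_all
        · rw [hcnt, hrest]
          exact ihx.1 h
      · intro h
        right
        rw [hcnt, hrest] at h
        exact ihx.2 h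

theorem pairwise_onceRuns {l : List Char} (hp : l.Pairwise (· ≤ ·)) :
    (onceRuns l).Pairwise (· < ·) := by
  induction l using onceRuns.induct with
  | case1 => simp [onceRuns_nil]
  | case2 c rest run ih =>
    have htail : (rest.dropWhile (fun y => y == c)).Pairwise (· ≤ ·) :=
      (List.pairwise_cons.1 hp).2.sublist (rest.dropWhile_sublist (p := fun y => y == c))
    have ih' : (onceRuns (rest.dropWhile (fun y => y == c))).Pairwise (· < ·) := ih htail
    rw [onceRuns_cons]
    apply List.pairwise_append.2
    refine ⟨?_, ih', ?_⟩
    · split <;> simp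
    · intro a ha b hb
      have hbt : b ∈ rest.dropWhile (fun y => y == c) := onceRuns_subset _ b hb
      have hac : a = c := by split at ha <;> simp_all
      have hle : c ≤ b := (List.pairwise_cons.1 hp).1 b
        ((rest.dropWhile_sublist (p := fun y => y == c)).mem hbt)
      have hne : c ≠ b := fun h => not_mem_tail hp (h ▸ hbt)
      rw [hac]
      exact lt_of_le_of_ne hle hne

theorem solution_eq_alt (s : String) : solution s = solution_alt s := by
  unfold solution solution_alt
  have hfold : s.toList.foldl
      (fun d i => if d.contains i then d.insert i (d.getD i 0 + 1) else d.insert i 1)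
      PySem.Dict.empty = PySem.Dict.counter s.toList := by
    rw [List.foldl_ext _ (fun (d : PySem.Dict Char Int) i => d.insert i (d.getD i 0 + 1)) _
      (by
        intro d i _
        by_cases h : d.contains i
        · simp [h]
        · have h0 : d.getD i 0 = 0 := PySem.Dict.getD_of_not_contains d 0 (by simpa using h)
          simp [h, h0])]
    exact PySem.Dict.foldl_insert_getD_add_one_eq_counter _
  rw [hfold]
  have hans : (PySem.Dict.counter s.toList).keys.foldl
      (fun acc i => if (PySem.Dict.counter s.toList).getD i 0 == 1 then acc ++ [i] else acc)
      ([] : List Char)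
      = (PySem.Set.ofList s.toList).filter (fun i => ((s.toList.count i : Int) == 1)) := by
    rw [PySem.List.foldl_append_if_eq_filter]
    rw [PySem.Dict.keys_counter, List.nil_append]
    congr 1
    funext i
    rw [PySem.Dict.getD_counter]
  show String.ofList (PySem.List.sorted
      ((PySem.Dict.counter s.toList).keys.foldl
        (fun acc i => if (PySem.Dict.counter s.toList).getD i 0 == 1 then acc ++ [i] else acc) [])
      (fun x => x) false) = _
  rw [hans]
  set t := PySem.List.sorted s.toList (fun x => x) false with hT
  have ht : t.Pairwise (· ≤ ·) := PySem.List.sorted_pairwise s.toList (fun x => x)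
  have hcnt : ∀ a : Char, t.count a = s.toList.count a := fun a =>
    (PySem.List.sorted_perm s.toList (fun x => x) false).count_eq a
  have hperm : (onceRuns t).Perm
      ((PySem.Set.ofList s.toList).filter (fun i => ((s.toList.count i : Int) == 1))) := by
    have hn1 : (onceRuns t).Nodup := (pairwise_onceRuns ht).imp ne_of_lt
    have hn2 : ((PySem.Set.ofList s.toList).filter
        (fun i => ((s.toList.count i : Int) == 1))).Nodup :=
      (PySem.Set.nodup_ofList s.toList).filter _
    refine (List.perm_ext_iff_of_nodup hn1 hn2).2 ?_
    intro a
    rw [mem_onceRuns ht a, List.mem_filter, PySem.Set.mem_ofList, hcnt]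
    constructor
    · intro h
      refine ⟨List.count_pos_iff.1 (by omega), by simp [h]⟩
    · rintro ⟨_, h⟩
      have : (s.toList.count a : Int) = 1 := by simpa using h
      exact_mod_cast this
  have hlt : (onceRuns t).Pairwise (fun a b => (fun x => x) a < (fun x => x) b) :=
    pairwise_onceRuns ht
  exact congrArg String.ofList (PySem.List.sorted_eq_of_perm_of_pairwise_lt _ _ _ hperm hlt)

-- ===== VERDICT (by name: the statement is the Claim_ definition above) =====
theorem solution_spec : Claim_equal_solution := by
  intro s _
  unfold Spec_solution
  exact solution_eq_alt s
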